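-- pv_equiv track=rewrite | github.com/SocialHummingbird/warhammer-40k-calculator | review_profiles.py | _unit_profile_review_category
-- ===== SOURCE A (Python) =====
-- from typing import Dict, Iterable, List, Optional, Sequence
--
-- def _unit_profile_review_category(unit: Dict[str, str], reasons: Sequence[str]) -> str:
--     if not reasons:
--         return "ok"
--     if any(reason.startswith("missing or invalid") for reason in reasons):
--         return "core_stats"
--     if any("model count" in reason for reason in reasons):
--         return "model_count"
--     if set(reasons).issubset({"missing points", "invalid points"}):
--         selection_type = (unit.get("selection_type") or "").strip().lower()
--         return "model_points_unset" if selection_type == "model" else "unit_points_unset"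
--     return "other"
-- ===== SOURCE B (Python) =====
-- def _severity(reason):
--     if reason.startswith("missing or invalid"):
--         return 3
--     if "model count" in reason:
--         return 2
--     if reason in ("missing points", "invalid points"):
--         return 0
--     return 1
--
--
-- def _unit_profile_review_category(unit, reasons):
--     worst = max(map(_severity, reasons), default=-1)
--     if worst == -1:
--         return "ok"
--     if worst == 3:
--         return "core_stats"
--     if worst == 2:
--         return "model_count"
--     if worst == 1:
--         return "other"
--     selection_type = (unit.get("selection_type") or "").strip().lower()
--     return "model_points_unset" if selection_type == "model" else "unit_points_unset"
-- ===== Notes on version B (the rewrite author's own statement) =====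
-- stated objective: alternative
-- what changed: Instead of priority-ordered whole-list scans and a set-subset test, B ranks each reason with a severity score (3 core, 2 model-count, 1 other, 0 points) and reads the category off the maximum severity (max with default -1 for the empty case).
import Mathlib
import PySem

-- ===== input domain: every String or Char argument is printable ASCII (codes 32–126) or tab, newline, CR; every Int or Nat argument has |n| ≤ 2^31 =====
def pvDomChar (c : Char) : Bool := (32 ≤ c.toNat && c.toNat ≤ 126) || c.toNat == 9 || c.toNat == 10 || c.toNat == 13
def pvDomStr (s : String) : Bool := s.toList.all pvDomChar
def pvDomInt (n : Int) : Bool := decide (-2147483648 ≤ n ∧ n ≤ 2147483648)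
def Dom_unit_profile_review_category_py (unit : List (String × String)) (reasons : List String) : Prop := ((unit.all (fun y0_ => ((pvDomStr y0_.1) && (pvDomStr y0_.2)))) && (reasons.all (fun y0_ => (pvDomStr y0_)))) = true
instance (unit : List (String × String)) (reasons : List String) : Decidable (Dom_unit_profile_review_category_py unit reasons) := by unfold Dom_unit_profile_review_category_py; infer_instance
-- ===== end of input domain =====

-- B replaces A's priority-ordered scans and set-subset test with a per-reason severity
-- score (3/2/1/0) combined by max; the category is read off the maximum (objective: alternative).

-- ===== PORT A =====
def unit_profile_review_category_py (unit : List (String × String)) (reasons : List String) : String :=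
  if reasons.isEmpty then "ok"
  else if reasons.any (fun reason => PySem.Str.startswith reason "missing or invalid") then "core_stats"
  else if reasons.any (fun reason => PySem.Str.isIn "model count" reason) then "model_count"
  else if PySem.Set.issubset (PySem.Set.ofList reasons) ["missing points", "invalid points"] then
    -- `unit.get("selection_type") or ""`: absent key and "" both give ""
    let selection_type := PySem.Str.lower (PySem.Str.strip ((unit.lookup "selection_type").getD ""))
    if selection_type == "model" then "model_points_unset" else "unit_points_unset"
  else "other"

-- ===== PORT B =====
def pvSeverity (reason : String) : Int :=
  if PySem.Str.startswith reason "missing or invalid" then 3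
  else if PySem.Str.isIn "model count" reason then 2
  else if reason == "missing points" || reason == "invalid points" then 0
  else 1

-- Python `max(iterable, default=-1)`: default on empty, else fold of `max` from the first element
def unit_profile_review_category_py_alt (unit : List (String × String)) (reasons : List String) : String :=
  let worst : Int :=
    match reasons.map pvSeverity with
    | [] => -1
    | x :: xs => xs.foldl max x
  if worst == -1 then "ok"
  else if worst == 3 then "core_stats"
  else if worst == 2 then "model_count"
  else if worst == 1 then "other"
  else
    let selection_type := PySem.Str.lower (PySem.Str.strip ((unit.lookup "selection_type").getD ""))
    if selection_type == "model" then "model_points_unset" else "unit_points_unset"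

-- ===== PRECONDITION & SPEC =====
def Spec_unit_profile_review_category_py (unit : List (String × String)) (reasons : List String) (out : String) : Prop := out = unit_profile_review_category_py_alt unit reasons
instance (unit : List (String × String)) (reasons : List String) (out : String) : Decidable (Spec_unit_profile_review_category_py unit reasons out) := by unfold Spec_unit_profile_review_category_py; infer_instance

-- ===== CLAIM (what is proved, stated in full; the proofs are below) =====
def Claim_equal_unit_profile_review_category_py : Prop := ∀ (unit : List (String × String)) (reasons : List String), Dom_unit_profile_review_category_py unit reasons → Spec_unit_profile_review_category_py unit reasons (unit_profile_review_category_py unit reasons)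

-- ===== LEMMAS AND PROOFS =====

-- the fold of max over mapped severities, characterised by A's three scans
theorem pvFold_char (rs : List String) (a : Int) :
    (rs.map pvSeverity).foldl max a =
      if rs.any (fun r => PySem.Str.startswith r "missing or invalid") then max a 3
      else if rs.any (fun r => PySem.Str.isIn "model count" r) then max a 2
      else if rs.all (fun r => r == "missing points" || r == "invalid points") then
        (if rs.isEmpty then a else max a 0)
      else max a 1 := by
  induction rs generalizing a with
  | nil => simp
  | cons r rs ih =>
    simp only [List.map_cons, List.foldl_cons, List.any_cons, List.all_cons, List.isEmpty_cons,
      ih (max a (pvSeverity r))]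
    by_cases h1 : PySem.Str.startswith r "missing or invalid" <;>
      by_cases h2 : PySem.Str.isIn "model count" r <;>
      by_cases h3 : (r == "missing points" || r == "invalid points") = true <;>
      simp only [pvSeverity, h1, h2, h3, if_true, Bool.false_or, Bool.true_or,
        Bool.false_and, Bool.true_and] <;>
      split_ifs <;> first | omega | simp_all

theorem pvSubset_eq_all (reasons : List String) :
    PySem.Set.issubset (PySem.Set.ofList reasons) ["missing points", "invalid points"] =
      reasons.all (fun r => r == "missing points" || r == "invalid points") := by
  rw [Bool.eq_iff_iff, PySem.Set.issubset_iff, List.all_eq_true]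
  constructor
  · intro h r hr
    have := h r (by simpa [PySem.Set.mem_ofList] using hr)
    simpa using this
  · intro h x hx
    have := h x (by simpa [PySem.Set.mem_ofList] using hx)
    simpa using this

theorem pvWorst_cons (r : String) (rs : List String) :
    (rs.map pvSeverity).foldl max (pvSeverity r) =
      if (r :: rs).any (fun x => PySem.Str.startswith x "missing or invalid") then 3
      else if (r :: rs).any (fun x => PySem.Str.isIn "model count" x) then 2
      else if (r :: rs).all (fun x => x == "missing points" || x == "invalid points") then 0
      else 1 := by
  rw [pvFold_char rs (pvSeverity r)]
  simp only [List.any_cons, List.all_cons]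
  by_cases h1 : PySem.Str.startswith r "missing or invalid" <;>
    by_cases h2 : PySem.Str.isIn "model count" r <;>
    by_cases h3 : (r == "missing points" || r == "invalid points") = true <;>
    simp only [pvSeverity, h1, h2, h3, if_true, Bool.true_or, Bool.false_or,
      Bool.true_and, Bool.false_and] <;>
    split_ifs <;> first | omega | simp_all

-- ===== VERDICT (by name: the statement is the Claim_ definition above) =====
theorem unit_profile_review_category_py_spec : Claim_equal_unit_profile_review_category_py := by
  intro unit reasons _
  unfold Spec_unit_profile_review_category_py
  unfold unit_profile_review_category_py unit_profile_review_category_py_alt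
  rw [pvSubset_eq_all]
  cases reasons with
  | nil => simp
  | cons r rs =>
    simp only [List.map_cons, pvWorst_cons]
    simp only [List.isEmpty_cons]
    split_ifs <;> simp_all
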